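-- pv_equiv track=rewrite | github.com/dev-boz/gitmem | umx/redaction.py | _find_unsafe_redaction_construct
-- ===== SOURCE A (Python) =====
-- def _is_regex_quantifier(pattern: str, index: int) -> bool:
--     if index >= len(pattern):
--         return False
--     if pattern[index] in "*+?":
--         return True
--     if pattern[index] != "{":
--         return False
--     closing = pattern.find("}", index + 1)
--     return closing != -1
--
-- def _find_unsafe_redaction_construct(pattern: str) -> str | None:
--     group_stack: list[int] = []
--     escaped = False
--     in_class = False
--
--     for index, char in enumerate(pattern):
--         if escaped:
--             if char.isdigit():
--                 return "backreferences"
--             escaped = False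
--             continue
--
--         if char == "\\":
--             escaped = True
--             continue
--
--         if in_class:
--             if char == "]":
--                 in_class = False
--             continue
--
--         if char == "[":
--             in_class = True
--             continue
--
--         if char == "." and _is_regex_quantifier(pattern, index + 1):
--             return "wildcard repeaters"
--
--         if char == "(":
--             if pattern.startswith("(?=", index) or pattern.startswith("(?!", index):
--                 return "lookarounds"
--             if pattern.startswith("(?<=", index) or pattern.startswith("(?<!", index):
--                 return "lookarounds"
--             if pattern.startswith("(?P=", index):
--                 return "backreferences"
--             group_stack.append(index)
--             continue
--
--         if char == ")" and group_stack:
--             group_stack.pop()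
--             if _is_regex_quantifier(pattern, index + 1):
--                 return "quantified groups"
--
--     return None
-- ===== SOURCE B (Python) =====
-- def _find_unsafe_redaction_construct(pattern: str) -> str | None:
--     # Two-stage design: a lexer first turns the pattern into a list of
--     # significant tokens (escape pairs, whole character classes, annotated
--     # dots/parens); a separate analyzer then folds over the token stream
--     # with a nesting counter.  No escaped/in_class state survives stage 1.
--     n = len(pattern)
--
--     def quant_at(j: int) -> bool:
--         if j >= n:
--             return False
--         c = pattern[j]
--         return c in "*+?" or (c == "{" and pattern.find("}", j + 1) != -1)
--
--     # Stage 1: lex.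
--     tokens = []
--     i = 0
--     while i < n:
--         c = pattern[i]
--         if c == "\\":
--             tokens.append(("esc", i + 1 < n and pattern[i + 1].isdigit()))
--             i += 2
--         elif c == "[":
--             i += 1
--             backref = False
--             while i < n and pattern[i] != "]":
--                 if pattern[i] == "\\":
--                     backref = backref or (i + 1 < n and pattern[i + 1].isdigit())
--                     i += 2
--                 else:
--                     i += 1
--             tokens.append(("class", backref))
--             i += 1
--         elif c == ".":
--             tokens.append(("dot", quant_at(i + 1)))
--             i += 1
--         elif c == "(":
--             if pattern.startswith(("(?=", "(?!", "(?<=", "(?<!"), i):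
--                 tokens.append(("look", False))
--             elif pattern.startswith("(?P=", i):
--                 tokens.append(("pref", False))
--             else:
--                 tokens.append(("group", False))
--             i += 1
--         elif c == ")":
--             tokens.append(("close", quant_at(i + 1)))
--             i += 1
--         else:
--             i += 1
--
--     # Stage 2: interpret the token stream.
--     depth = 0
--     for kind, flag in tokens:
--         if kind == "esc" or kind == "class":
--             if flag:
--                 return "backreferences"
--         elif kind == "dot":
--             if flag:
--                 return "wildcard repeaters"
--         elif kind == "look":
--             return "lookarounds"
--         elif kind == "pref":
--             return "backreferences"
--         elif kind == "group":
--             depth += 1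
--         elif depth > 0:  # kind == "close"
--             depth -= 1
--             if flag:
--                 return "quantified groups"
--     return None
-- ===== Notes on version B (the rewrite author's own statement) =====
-- stated objective: alternative
-- what changed: Replaces A's single-pass FSM with escaped/in_class flags and an index stack by a two-stage lexer/analyzer: a first pass lexes the pattern into a token list (escape pairs, whole character classes with a backref flag, dots and parens annotated with whether a quantifier follows), and a second pass folds over that token stream with only an integer nesting counter.
import Mathlib
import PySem

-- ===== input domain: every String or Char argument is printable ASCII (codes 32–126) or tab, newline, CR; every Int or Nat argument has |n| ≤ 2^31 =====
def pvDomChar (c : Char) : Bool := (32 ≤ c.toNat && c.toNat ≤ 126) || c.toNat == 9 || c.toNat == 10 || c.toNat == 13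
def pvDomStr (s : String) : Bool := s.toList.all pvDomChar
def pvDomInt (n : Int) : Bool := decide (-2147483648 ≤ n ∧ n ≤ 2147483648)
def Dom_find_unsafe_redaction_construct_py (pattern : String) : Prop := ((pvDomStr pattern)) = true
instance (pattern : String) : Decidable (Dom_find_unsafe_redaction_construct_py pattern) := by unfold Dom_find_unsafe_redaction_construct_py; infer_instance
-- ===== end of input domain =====

-- B replaces A's one-pass flag-FSM by a two-stage lexer/analyzer: stage 1 lexes the pattern
-- into a token list (escape pairs, whole character classes, annotated dots/parens), stage 2
-- folds over the tokens with a nesting counter (objective: alternative; same cost).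

-- ===== PORT A =====
-- port of _is_regex_quantifier: pattern.find("}", index+1) != -1 is membership of '}' in the tail
def isQuantA (p : List Char) (index : Nat) : Bool :=
  if p.length ≤ index then false
  else match p[index]? with
    | none => false
    | some c =>
      if c == '*' || c == '+' || c == '?' then true
      else if c != '{' then false
      else (p.drop (index + 1)).contains '}'

-- pattern.startswith(s, i)
def swAt (p : List Char) (i : Nat) (s : List Char) : Bool := s.isPrefixOf (p.drop i)

-- the for-loop of A: one step per character, state (escaped, in_class, group_stack)
def aLoop (p : List Char) : List Char → Nat → Bool → Bool → List Nat → Option String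
  | [], _, _, _, _ => none
  | c :: rest, i, escaped, in_class, stack =>
    if escaped then
      if c.isDigit then some "backreferences"
      else aLoop p rest (i + 1) false in_class stack
    else if c == '\\' then aLoop p rest (i + 1) true in_class stack
    else if in_class then
      if c == ']' then aLoop p rest (i + 1) escaped false stack
      else aLoop p rest (i + 1) escaped in_class stack
    else if c == '[' then aLoop p rest (i + 1) escaped true stack
    else if c == '.' && isQuantA p (i + 1) then some "wildcard repeaters"
    else if c == '(' then
      if swAt p i "(?=".toList || swAt p i "(?!".toList then some "lookarounds"
      else if swAt p i "(?<=".toList || swAt p i "(?<!".toList then some "lookarounds"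
      else if swAt p i "(?P=".toList then some "backreferences"
      else aLoop p rest (i + 1) escaped in_class (i :: stack)
    else if c == ')' && !stack.isEmpty then
      if isQuantA p (i + 1) then some "quantified groups"
      else aLoop p rest (i + 1) escaped in_class stack.tail
    else aLoop p rest (i + 1) escaped in_class stack

def find_unsafe_redaction_construct_py (pattern : String) : Option String :=
  aLoop pattern.toList pattern.toList 0 false false []

-- ===== PORT B =====
-- B's token type (kind strings of Source B become constructors; the bool is the token's flag)
inductive Tok
  | esc : Bool → Tok      -- escape pair; flag = escaped char is a digit
  | cls : Bool → Tok      -- character class span; flag = escaped digit inside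
  | dot : Bool → Tok      -- '.'; flag = quantifier follows
  | look : Tok            -- '(' opening a lookaround
  | pref : Tok            -- '(?P=' named backreference
  | grp : Tok             -- plain '('
  | close : Bool → Tok    -- ')'; flag = quantifier follows
  deriving DecidableEq, Repr

-- quant_at of Source B
def quantB (p : List Char) (j : Nat) : Bool :=
  match p[j]? with
  | none => false
  | some c => c == '*' || c == '+' || c == '?' || (c == '{' && (p.drop (j + 1)).contains '}')

def prefixAt (p : List Char) (i : Nat) (s : List Char) : Bool := s.isPrefixOf (p.drop i)

-- the inner while-loop consuming a character class: returns (backref flag, resume index);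
-- fuel is only a totality guard, never exhausted when fuel ≥ p.length - i
def lexClass (p : List Char) : Nat → Nat → Bool × Nat
  | 0, i => (false, i + 1)
  | fuel + 1, i =>
    if h : i < p.length then
      let c := p[i]
      if c == ']' then (false, i + 1)
      else if c == '\\' then
        let r := lexClass p fuel (i + 2)
        (((p[i + 1]?).any Char.isDigit) || r.1, r.2)
      else lexClass p fuel (i + 1)
    else (false, i + 1)

-- stage 1 of Source B: lex the pattern into tokens (fuel: totality guard only)
def tokenize (p : List Char) : Nat → Nat → List Tok
  | 0, _ => []
  | fuel + 1, i =>
    if h : i < p.length then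
      let c := p[i]
      if c == '\\' then Tok.esc ((p[i + 1]?).any Char.isDigit) :: tokenize p fuel (i + 2)
      else if c == '[' then
        let r := lexClass p fuel (i + 1)
        Tok.cls r.1 :: tokenize p fuel r.2
      else if c == '.' then Tok.dot (quantB p (i + 1)) :: tokenize p fuel (i + 1)
      else if c == '(' then
        (if prefixAt p i "(?=".toList || prefixAt p i "(?!".toList ||
            prefixAt p i "(?<=".toList || prefixAt p i "(?<!".toList then Tok.look
         else if prefixAt p i "(?P=".toList then Tok.pref
         else Tok.grp) :: tokenize p fuel (i + 1)
      else if c == ')' then Tok.close (quantB p (i + 1)) :: tokenize p fuel (i + 1)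
      else tokenize p fuel (i + 1)
    else []

-- stage 2 of Source B: fold over the token stream with a nesting counter
def analyze : List Tok → Nat → Option String
  | [], _ => none
  | t :: rest, depth =>
    match t with
    | .esc b => if b then some "backreferences" else analyze rest depth
    | .cls b => if b then some "backreferences" else analyze rest depth
    | .dot b => if b then some "wildcard repeaters" else analyze rest depth
    | .look => some "lookarounds"
    | .pref => some "backreferences"
    | .grp => analyze rest (depth + 1)
    | .close b =>
      if 0 < depth then
        if b then some "quantified groups" else analyze rest (depth - 1)
      else analyze rest depth

def find_unsafe_redaction_construct_py_alt (pattern : String) : Option String :=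
  analyze (tokenize pattern.toList pattern.toList.length 0) 0

-- ===== PRECONDITION & SPEC =====
def Spec_find_unsafe_redaction_construct_py (pattern : String) (out : Option String) : Prop := out = find_unsafe_redaction_construct_py_alt pattern
instance (pattern : String) (out : Option String) : Decidable (Spec_find_unsafe_redaction_construct_py pattern out) := by unfold Spec_find_unsafe_redaction_construct_py; infer_instance

-- ===== CLAIM (what is proved, stated in full; the proofs are below) =====
def Claim_equal_find_unsafe_redaction_construct_py : Prop := ∀ (pattern : String), Dom_find_unsafe_redaction_construct_py pattern → Spec_find_unsafe_redaction_construct_py pattern (find_unsafe_redaction_construct_py pattern)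

-- ===== LEMMAS AND PROOFS =====

theorem quant_eq (p : List Char) (j : Nat) : isQuantA p j = quantB p j := by
  by_cases h : p.length ≤ j
  · have hn : p[j]? = none := by simp [List.getElem?_eq_none_iff]; omega
    simp [isQuantA, quantB, h, hn]
  · have hj : j < p.length := by omega
    simp [isQuantA, quantB, h, List.getElem?_eq_getElem hj]
    by_cases h1 : p[j] == '*' <;> by_cases h2 : p[j] == '+' <;>
      by_cases h3 : p[j] == '?' <;> by_cases h4 : p[j] == '{' <;>
      simp_all

theorem lexClass_gt (p : List Char) :
    ∀ fuel i, i < (lexClass p fuel i).2 := by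
  intro fuel
  induction fuel with
  | zero => intro i; simp [lexClass]
  | succ fuel ih =>
    intro i
    simp only [lexClass]
    by_cases h : i < p.length
    · simp only [dif_pos h]
      by_cases h1 : p[i] == ']'
      · simp [h1]
      · by_cases h2 : p[i] == '\\'
        · simp only [h1, h2, Bool.false_eq_true, if_false, if_true, eq_self_iff_true]
          have := ih (i + 2); omega
        · simp only [h1, h2, Bool.false_eq_true, if_false]
          have := ih (i + 1); omega
    · simp [h]

theorem lexClass_past (p : List Char) :
    ∀ fuel i, p.length ≤ i → lexClass p fuel i = (false, i + 1) := by
  intro fuel i hi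
  cases fuel with
  | zero => simp [lexClass]
  | succ fuel => simp [lexClass, show ¬ i < p.length by omega]

theorem tokenize_past (p : List Char) :
    ∀ fuel i, p.length ≤ i → tokenize p fuel i = [] := by
  intro fuel i hi
  cases fuel with
  | zero => simp [tokenize]
  | succ fuel => simp [tokenize, show ¬ i < p.length by omega]

-- the character-class correspondence: A's in_class scan vs B's lexClass token
theorem class_eq (p : List Char) (k : Nat) :
    ∀ i stack, p.length - i ≤ k →
      aLoop p (p.drop i) i false true stack =
      (if (lexClass p k i).1 then some "backreferences"
       else aLoop p (p.drop (lexClass p k i).2) (lexClass p k i).2 false false stack) := by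
  induction k with
  | zero =>
    intro i stack hk
    have e1 : List.drop i p = [] := List.drop_eq_nil_of_le (by omega)
    have e2 : List.drop (i + 1) p = [] := List.drop_eq_nil_of_le (by omega)
    simp [lexClass, aLoop, e1, e2]
  | succ k ih =>
    intro i stack hk
    by_cases h : i < p.length
    · rw [List.drop_eq_getElem_cons h]
      simp only [lexClass, dif_pos h]
      by_cases h2 : p[i] == ']'
      · simp [aLoop, h2, show ¬ (p[i] == '\\') = true by simp at h2 ⊢; rw [h2]; decide]
      · by_cases h1 : p[i] == '\\'
        · simp only [aLoop, Bool.false_eq_true, if_false, if_true, eq_self_iff_true,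
            if_pos h1, h2]
          by_cases h3 : i + 1 < p.length
          · rw [List.drop_eq_getElem_cons h3]
            simp only [aLoop, List.getElem?_eq_getElem h3, Option.any_some]
            by_cases h4 : p[i + 1].isDigit
            · simp [h4]
            · simp only [h4, Bool.false_eq_true, if_false, Bool.false_or]
              rw [ih (i + 2) stack (by omega), if_pos trivial]
          · have h4 : p[i + 1]? = none := by
              simp [List.getElem?_eq_none_iff]; omega
            rw [List.drop_eq_nil_of_le (by omega)]
            simp only [aLoop, h4, Option.any_none, Bool.false_eq_true, if_false,
              Bool.false_or]
            rw [lexClass_past p k (i + 2) (by omega)]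
            have e3 : List.drop (i + 3) p = [] := List.drop_eq_nil_of_le (by omega)
            simp [aLoop, e3]
        · simp only [aLoop, Bool.false_eq_true, if_false, if_true, eq_self_iff_true,
            h1, h2]
          rw [ih (i + 1) stack (by omega)]
    · have e1 : List.drop i p = [] := List.drop_eq_nil_of_le (by omega)
      have e2 : List.drop (i + 1) p = [] := List.drop_eq_nil_of_le (by omega)
      rw [lexClass_past p (k + 1) i (by omega)]
      simp [aLoop, e1, e2]

-- the main correspondence: A's FSM from index i equals analyzing B's tokens from index i
theorem main_eq (p : List Char) (k : Nat) :
    ∀ i (stack : List Nat), p.length - i ≤ k →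
      aLoop p (p.drop i) i false false stack = analyze (tokenize p k i) stack.length := by
  induction k with
  | zero =>
    intro i stack hk
    rw [List.drop_eq_nil_of_le (by omega)]
    simp [aLoop, tokenize, analyze]
  | succ k ih =>
    intro i stack hk
    by_cases h : i < p.length
    · rw [List.drop_eq_getElem_cons h]
      simp only [tokenize, dif_pos h]
      by_cases h1 : p[i] == '\\'
      · simp only [aLoop, Bool.false_eq_true, if_false, if_true, eq_self_iff_true,
          if_pos h1, analyze]
        by_cases h3 : i + 1 < p.length
        · rw [List.drop_eq_getElem_cons h3]
          simp only [aLoop, List.getElem?_eq_getElem h3, Option.any_some]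
          by_cases h4 : p[i + 1].isDigit
          · simp [h4]
          · simp only [h4, Bool.false_eq_true, if_false]
            rw [ih (i + 2) stack (by omega), if_pos trivial]
        · have h4 : p[i + 1]? = none := by
            simp [List.getElem?_eq_none_iff]; omega
          rw [List.drop_eq_nil_of_le (by omega)]
          simp only [aLoop, h4, Option.any_none, Bool.false_eq_true, if_false]
          rw [tokenize_past p k (i + 2) (by omega)]
          simp [analyze]
      · by_cases h2 : p[i] == '['
        · simp only [aLoop, Bool.false_eq_true, if_false, if_true, eq_self_iff_true,
            h1, if_pos h2, analyze]
          rw [class_eq p k (i + 1) stack (by omega)]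
          by_cases hb : (lexClass p k (i + 1)).1
          · simp [hb]
          · simp only [hb, Bool.false_eq_true, if_false]
            have := lexClass_gt p k (i + 1)
            rw [ih (lexClass p k (i + 1)).2 stack (by omega)]
        · by_cases h3 : p[i] == '.'
          · have h4 : ¬ (p[i] == '(') = true := by simp at h3 ⊢; rw [h3]; decide
            have h5 : ¬ (p[i] == ')') = true := by simp at h3 ⊢; rw [h3]; decide
            simp only [aLoop, Bool.false_eq_true, if_false, if_true, eq_self_iff_true,
              h1, h2, h3, h4, h5, Bool.true_and, Bool.false_and, quant_eq, analyze]
            by_cases h6 : quantB p (i + 1)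
            · simp [h6]
            · simp only [h6, Bool.false_eq_true, if_false]
              rw [ih (i + 1) stack (by omega)]
          · by_cases h4 : p[i] == '('
            · have h5 : ¬ (p[i] == ')') = true := by simp at h4 ⊢; rw [h4]; decide
              simp only [aLoop, Bool.false_eq_true, if_false, if_true, eq_self_iff_true,
                h1, h2, h3, h4, h5, Bool.false_and, if_pos rfl]
              simp only [swAt, prefixAt]
              by_cases e1 : ("(?=".toList.isPrefixOf (p.drop i) : Bool) <;>
                by_cases e2 : ("(?!".toList.isPrefixOf (p.drop i) : Bool) <;>
                by_cases e3 : ("(?<=".toList.isPrefixOf (p.drop i) : Bool) <;>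
                by_cases e4 : ("(?<!".toList.isPrefixOf (p.drop i) : Bool) <;>
                by_cases e5 : ("(?P=".toList.isPrefixOf (p.drop i) : Bool) <;>
                simp only [e1, e2, e3, e4, e5, Bool.true_or, Bool.or_true, Bool.false_or,
                  Bool.or_false, if_pos rfl, Bool.false_eq_true, if_false, analyze] <;>
                rw [ih (i + 1) (i :: stack) (by omega)] <;> rfl
            · by_cases h5 : p[i] == ')'
              · simp only [aLoop, Bool.false_eq_true, if_false, if_true, eq_self_iff_true,
                  h1, h2, h3, h4, h5, Bool.false_and, Bool.true_and, quant_eq, analyze]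
                cases stack with
                | nil =>
                  simp only [List.isEmpty_nil, Bool.not_true, Bool.and_false,
                    List.length_nil, Nat.lt_irrefl, if_false, Bool.false_eq_true]
                  rw [ih (i + 1) [] (by omega)]
                  simp
                | cons a tl =>
                  simp only [List.isEmpty_cons, Bool.not_false, Bool.and_true,
                    List.length_cons, show 0 < tl.length + 1 by omega, if_pos rfl]
                  by_cases h6 : quantB p (i + 1)
                  · simp [h6]
                  · simp only [h6, Bool.false_eq_true, if_false, List.tail_cons,
                      Nat.add_sub_cancel]
                    rw [ih (i + 1) tl (by omega)]
                    simp
              · simp only [aLoop, Bool.false_eq_true, if_false, if_true, eq_self_iff_true,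
                  h1, h2, h3, h4, h5, Bool.false_and]
                rw [ih (i + 1) stack (by omega)]
    · rw [List.drop_eq_nil_of_le (by omega)]
      simp [aLoop, tokenize, h, analyze]

-- ===== VERDICT (by name: the statement is the Claim_ definition above) =====
theorem find_unsafe_redaction_construct_py_spec : Claim_equal_find_unsafe_redaction_construct_py := by
  intro pattern _
  unfold Spec_find_unsafe_redaction_construct_py find_unsafe_redaction_construct_py find_unsafe_redaction_construct_py_alt
  have := main_eq pattern.toList pattern.toList.length 0 [] (by omega)
  simpa using this
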